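-- pv_equiv track=rewrite | github.com/KIMSEULBEEN/problem-solving | BOJ/15953.py | second_code
-- ===== SOURCE A (Python) =====
-- def second_code(num):
--     ds = 0
--     for n in range(6):
--         ds += 2**n
--         if num == 0:
--             break
--         if num <= ds:
--             break
--     n += 1
--     if num == 0:
--         return 0
--
--     if n == 1:
--         return 512
--     elif n == 2:
--         return 256
--     elif n == 3:
--         return 128
--     elif n == 4:
--         return 64
--     elif n == 5:
--         return 32
--     else:
--         return 0
-- ===== SOURCE B (Python) =====
-- def second_code(num):
--     # Closed form: the prize brackets are the binary magnitude bands of the rank,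
--     # so prize = 512 >> (bit_length(num) - 1) for ranks 2..31.
--     if num == 0:
--         return 0
--     if num <= 1:
--         return 512  # the first bracket covers every rank <= 1
--     b = num.bit_length()
--     return 512 >> (b - 1) if b <= 5 else 0
-- ===== Notes on version B (the rewrite author's own statement) =====
-- stated objective: alternative
-- what changed: Replaces A's threshold-scanning loop plus n-index if-elif chain by an arithmetic closed form: prize = 512 >> (bit_length(num)-1), using that the prize brackets are exactly the binary magnitude bands.
import Mathlib
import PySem

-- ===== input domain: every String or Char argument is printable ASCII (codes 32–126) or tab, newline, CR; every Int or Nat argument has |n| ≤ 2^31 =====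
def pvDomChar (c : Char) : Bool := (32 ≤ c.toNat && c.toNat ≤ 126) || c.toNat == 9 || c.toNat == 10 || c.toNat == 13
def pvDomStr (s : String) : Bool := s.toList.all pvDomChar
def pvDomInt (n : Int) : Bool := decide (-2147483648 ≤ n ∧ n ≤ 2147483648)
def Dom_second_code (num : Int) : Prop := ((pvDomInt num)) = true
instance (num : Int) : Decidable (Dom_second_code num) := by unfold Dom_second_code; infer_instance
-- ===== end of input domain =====

-- B replaces A's threshold-scanning loop and n-index if-elif chain by a bit-length
-- closed form (prize = 512 >> (bit_length(num)-1)): a different, arithmetic algorithm.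


-- ===== PORT A =====
-- A's for-loop with break: state (ds, n); returns (ds, last n) at break or loop end.
-- 2**n is exact as 2 ^ k.toNat since pyRange 0 6 1 yields only nonnegative k.
def second_code_loop (num : Int) : List Int → Int → Int → Int × Int
  | [], ds, n => (ds, n)
  | k :: rest, ds, _ =>
    let ds' := ds + 2 ^ k.toNat
    if num = 0 then (ds', k)
    else if num ≤ ds' then (ds', k)
    else second_code_loop num rest ds' k

def second_code (num : Int) : Int :=
  let p := second_code_loop num (PySem.List.pyRange 0 6 1) 0 0
  let n := p.2 + 1
  if num = 0 then 0
  else if n = 1 then 512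
  else if n = 2 then 256
  else if n = 3 then 128
  else if n = 4 then 64
  else if n = 5 then 32
  else 0

-- ===== PORT B =====
-- int.bit_length for a nonnegative int: number of binary digits (0 for 0).
def pvBitLen : Nat → Nat
  | 0 => 0
  | n + 1 => pvBitLen ((n + 1) / 2) + 1

-- 512 >> (b-1) on a nonnegative shift is division by 2^(b-1): exact here.
def second_code_alt (num : Int) : Int :=
  if num = 0 then 0
  else if num ≤ 1 then 512
  else
    let b := pvBitLen num.toNat
    if b ≤ 5 then ((512 / 2 ^ (b - 1) : Nat) : Int) else 0

-- ===== PRECONDITION & SPEC =====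
def Spec_second_code (num : Int) (out : Int) : Prop := out = second_code_alt num
instance (num : Int) (out : Int) : Decidable (Spec_second_code num out) := by unfold Spec_second_code; infer_instance

-- ===== CLAIM (what is proved, stated in full; the proofs are below) =====
def Claim_equal_second_code : Prop := ∀ (num : Int), Dom_second_code num → Spec_second_code num (second_code num)

-- ===== LEMMAS AND PROOFS =====
theorem pyRange_six : PySem.List.pyRange 0 6 1 = [0, 1, 2, 3, 4, 5] := by
  rw [PySem.List.pyRange_one]
  norm_num [show Int.toNat 6 = 6 from rfl, List.range_succ]

theorem second_code_loop_eval (num : Int) :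
    second_code_loop num [0, 1, 2, 3, 4, 5] 0 0 =
      (if num = 0 then (1, 0) else if num ≤ 1 then (1, 0)
       else if num ≤ 3 then (3, 1) else if num ≤ 7 then (7, 2)
       else if num ≤ 15 then (15, 3) else if num ≤ 31 then (31, 4) else (63, 5)) := by
  simp only [second_code_loop]
  norm_num [show ((2:Int).toNat) = 2 from rfl, show ((3:Int).toNat) = 3 from rfl,
    show ((4:Int).toNat) = 4 from rfl, show ((5:Int).toNat) = 5 from rfl]
  split_ifs <;> rfl

theorem pvBitLen_le (k : Nat) : ∀ n : Nat, pvBitLen n ≤ k ↔ n < 2 ^ k := by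
  induction k with
  | zero =>
    intro n
    cases n with
    | zero => simp [pvBitLen]
    | succ m => simp [pvBitLen]
  | succ k ih =>
    intro n
    cases n with
    | zero => simp [pvBitLen]
    | succ m =>
      rw [pvBitLen, Nat.succ_le_succ_iff, ih, pow_succ]
      constructor
      · intro h; omega
      · intro h; omega

theorem pvBitLen_eq_of (n lo : Nat) (h1 : 2 ^ lo ≤ n) (h2 : n < 2 ^ (lo + 1)) :
    pvBitLen n = lo + 1 := by
  have ha := (pvBitLen_le (lo + 1) n).mpr h2
  have hb : ¬ pvBitLen n ≤ lo := by
    rw [pvBitLen_le]; omega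
  omega

-- ===== VERDICT (by name: the statement is the Claim_ definition above) =====
theorem second_code_spec : Claim_equal_second_code := by
  intro num _
  unfold Spec_second_code second_code second_code_alt
  rw [pyRange_six, second_code_loop_eval]
  by_cases h0 : num = 0
  · norm_num [h0]
  by_cases h1 : num ≤ 1
  · norm_num [h0, h1]
  -- now 2 ≤ num; set n := num.toNat with 2 ≤ n and n = num
  have hn : (num.toNat : Int) = num := Int.toNat_of_nonneg (by omega)
  by_cases h2 : num ≤ 3
  · have hb : pvBitLen num.toNat = 2 := pvBitLen_eq_of _ 1 (by omega) (by omega)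
    norm_num [h0, h1, h2, hb]
  by_cases h3 : num ≤ 7
  · have hb : pvBitLen num.toNat = 3 := pvBitLen_eq_of _ 2 (by omega) (by omega)
    norm_num [h0, h1, h2, h3, hb]
  by_cases h4 : num ≤ 15
  · have hb : pvBitLen num.toNat = 4 := pvBitLen_eq_of _ 3 (by omega) (by omega)
    norm_num [h0, h1, h2, h3, h4, hb]
  by_cases h5 : num ≤ 31
  · have hb : pvBitLen num.toNat = 5 := pvBitLen_eq_of _ 4 (by omega) (by omega)
    norm_num [h0, h1, h2, h3, h4, h5, hb]
  · have hb : ¬ pvBitLen num.toNat ≤ 5 := by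
      rw [pvBitLen_le]; omega
    norm_num [h0, h1, h2, h3, h4, h5, hb]
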